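-- pv_equiv track=rewrite | github.com/afrojuju1/spreads | src/spreads/services/execution_portfolio.py | _mark_source_for_symbols
-- ===== SOURCE A (Python) =====
-- def _mark_source_for_symbols(sources: dict[str, str], short_symbol: str, long_symbol: str) -> str | None:
--     values = {
--         sources[symbol]
--         for symbol in (short_symbol, long_symbol)
--         if symbol in sources and sources[symbol]
--     }
--     if not values:
--         return None
--     if len(values) == 1:
--         return next(iter(values))
--     return "mixed"
-- ===== SOURCE B (Python) =====
-- def _mark_source_for_symbols(sources: dict[str, str], short_symbol: str, long_symbol: str) -> str | None:
--     label = None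
--     for key, value in sources.items():
--         if (key == short_symbol or key == long_symbol) and value:
--             if label is None:
--                 label = value
--             elif value != label:
--                 return "mixed"
--     return label
-- ===== Notes on version B (the rewrite author's own statement) =====
-- stated objective: alternative
-- what changed: Replaces A's per-symbol dict lookups plus set-size branching with a single pass over sources.items() that carries a running label and exits early with 'mixed' on a conflicting value.
import Mathlib
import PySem

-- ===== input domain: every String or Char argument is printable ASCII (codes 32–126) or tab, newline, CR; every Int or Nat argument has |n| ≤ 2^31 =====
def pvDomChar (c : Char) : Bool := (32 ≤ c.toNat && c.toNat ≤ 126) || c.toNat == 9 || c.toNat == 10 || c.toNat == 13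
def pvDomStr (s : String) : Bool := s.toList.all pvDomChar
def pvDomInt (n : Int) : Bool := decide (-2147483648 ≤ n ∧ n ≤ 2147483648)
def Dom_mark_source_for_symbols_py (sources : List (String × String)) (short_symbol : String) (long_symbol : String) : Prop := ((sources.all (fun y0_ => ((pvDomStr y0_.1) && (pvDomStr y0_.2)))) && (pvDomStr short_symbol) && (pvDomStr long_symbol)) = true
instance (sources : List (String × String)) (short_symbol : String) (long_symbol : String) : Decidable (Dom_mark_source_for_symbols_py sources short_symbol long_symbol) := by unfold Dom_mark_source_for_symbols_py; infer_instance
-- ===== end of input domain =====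

-- B replaces A's two dict lookups + set-size branching by a single pass over the items with a running label (alternative decomposition).


-- ===== PORT A =====
def mark_source_for_symbols_py (sources : List (String × String)) (short_symbol : String) (long_symbol : String) : Option String :=
  let d : PySem.Dict String String := PySem.Dict.mk sources
  -- set comprehension over (short_symbol, long_symbol): guard 'symbol in sources and sources[symbol]'
  let values : PySem.Set String :=
    [short_symbol, long_symbol].foldl
      (fun s sym =>
        match d.get? sym with
        | some v => if v ≠ "" then PySem.Set.add s v else s
        | none => s)
      PySem.Set.empty
  match values with
  | [] => none
  | [v] => some v        -- len(values) == 1: next(iter(values))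
  | _ => some "mixed"

-- ===== PORT B =====
-- the for-loop of Source B with its early 'return "mixed"': structural recursion over the items carrying 'label'
def markAltLoop (short_symbol long_symbol : String) : List (String × String) → Option String → Option String
  | [], label => label
  | (key, value) :: rest, label =>
    if (key = short_symbol ∨ key = long_symbol) ∧ value ≠ "" then
      match label with
      | none => markAltLoop short_symbol long_symbol rest (some value)
      | some l => if value ≠ l then some "mixed" else markAltLoop short_symbol long_symbol rest (some l)
    else markAltLoop short_symbol long_symbol rest label

def mark_source_for_symbols_py_alt (sources : List (String × String)) (short_symbol : String) (long_symbol : String) : Option String :=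
  markAltLoop short_symbol long_symbol sources none

-- ===== PRECONDITION & SPEC =====
-- Pre_ excludes association lists with duplicate keys: they cannot arise from a Python dict (the
-- argument's type), and only there could A's first-match lookup and B's full scan disagree.
def Pre_mark_source_for_symbols_py (sources : List (String × String)) (short_symbol : String) (long_symbol : String) : Prop :=
  (sources.map Prod.fst).Nodup
instance (sources : List (String × String)) (short_symbol : String) (long_symbol : String) : Decidable (Pre_mark_source_for_symbols_py sources short_symbol long_symbol) := by unfold Pre_mark_source_for_symbols_py; infer_instance
def pvWitness_mark_source_for_symbols_py : (List (String × String)) × String × String := ([("AAPL", "iex"), ("MSFT", "iex")], "AAPL", "MSFT")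

def Spec_mark_source_for_symbols_py (sources : List (String × String)) (short_symbol : String) (long_symbol : String) (out : Option String) : Prop := out = mark_source_for_symbols_py_alt sources short_symbol long_symbol
instance (sources : List (String × String)) (short_symbol : String) (long_symbol : String) (out : Option String) : Decidable (Spec_mark_source_for_symbols_py sources short_symbol long_symbol out) := by unfold Spec_mark_source_for_symbols_py; infer_instance

-- ===== CLAIM (what is proved, stated in full; the proofs are below) =====
def Claim_equal_mark_source_for_symbols_py : Prop := ∀ (sources : List (String × String)) (short_symbol : String) (long_symbol : String), Dom_mark_source_for_symbols_py sources short_symbol long_symbol → Pre_mark_source_for_symbols_py sources short_symbol long_symbol → Spec_mark_source_for_symbols_py sources short_symbol long_symbol (mark_source_for_symbols_py sources short_symbol long_symbol)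

-- ===== LEMMAS AND PROOFS =====

-- first-match lookup on the list, already filtered for the 'and sources[symbol]' (nonempty) guard
def flook : List (String × String) → String → Option String
  | [], _ => none
  | (k, v) :: rest, s => if k = s then (if v = "" then none else some v) else flook rest s

-- the combine of the two filtered lookups that characterises A
def combine2 : Option String → Option String → Option String
  | none, none => none
  | some v, none => some v
  | none, some w => some w
  | some v, some w => if v = w then some v else some "mixed"

theorem flook_eq (l : List (String × String)) (s : String) :
    flook l s = match (PySem.Dict.mk l).get? s with
                | some v => if v = "" then none else some v
                | none => none := by
  induction l with
  | nil => simp [flook, PySem.Dict.get?]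
  | cons p rest ih =>
    obtain ⟨k, v⟩ := p
    rw [flook, PySem.Dict.get?_mk_cons]
    by_cases h : k = s <;> simp [h, ih]

theorem flook_eq_none_of_not_mem (l : List (String × String)) (s : String)
    (h : s ∉ l.map Prod.fst) : flook l s = none := by
  induction l with
  | nil => rfl
  | cons p rest ih =>
    obtain ⟨k, v⟩ := p
    simp only [List.map_cons, List.mem_cons] at h
    push_neg at h
    simp [flook, Ne.symm h.1, ih h.2]

theorem a_eq_combine2 (sources : List (String × String)) (s t : String) :
    mark_source_for_symbols_py sources s t = combine2 (flook sources s) (flook sources t) := by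
  unfold mark_source_for_symbols_py
  rw [flook_eq, flook_eq]
  simp only [List.foldl]
  cases h1 : (PySem.Dict.mk sources : PySem.Dict String String).get? s with
  | none =>
    cases h2 : (PySem.Dict.mk sources : PySem.Dict String String).get? t with
    | none => simp [PySem.Set.empty, combine2]
    | some w =>
      by_cases hw : w = "" <;>
        simp [PySem.Set.empty, PySem.Set.add, PySem.Set.contains, hw, combine2]
  | some v =>
    cases h2 : (PySem.Dict.mk sources : PySem.Dict String String).get? t with
    | none =>
      by_cases hv : v = "" <;>
        simp [PySem.Set.empty, PySem.Set.add, PySem.Set.contains, hv, combine2]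
    | some w =>
      by_cases hv : v = "" <;> by_cases hw : w = "" <;> by_cases hvw : v = w <;>
        simp_all [PySem.Set.empty, PySem.Set.add, PySem.Set.contains, combine2] <;>
        simp [if_neg (Ne.symm hvw)]

-- no remaining entry matches either symbol: the loop keeps its label
theorem markAltLoop_no_match (s t : String) (l : List (String × String)) (label : Option String)
    (hs : s ∉ l.map Prod.fst) (ht : t ∉ l.map Prod.fst) :
    markAltLoop s t l label = label := by
  induction l generalizing label with
  | nil => rfl
  | cons p rest ih =>
    obtain ⟨k, v⟩ := p
    simp only [List.map_cons, List.mem_cons] at hs ht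
    push_neg at hs ht
    simp only [markAltLoop]
    rw [if_neg (show ¬((k = s ∨ k = t) ∧ v ≠ "") from by rintro ⟨(h | h), _⟩ <;> simp_all)]
    exact ih _ hs.2 ht.2

-- label already set, one symbol exhausted: the rest of the loop is decided by the other symbol's lookup
theorem markAltLoop_some (s t : String) (l : List (String × String)) (v : String)
    (hnd : (l.map Prod.fst).Nodup) (hs : s ∉ l.map Prod.fst) :
    markAltLoop s t l (some v) =
      match flook l t with
      | none => some v
      | some w => if w = v then some v else some "mixed" := by
  induction l with
  | nil => rfl
  | cons p rest ih =>
    obtain ⟨k, v'⟩ := p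
    simp only [List.map_cons, List.mem_cons] at hs
    push_neg at hs
    simp only [List.map_cons, List.nodup_cons] at hnd
    by_cases hkt : k = t
    · subst hkt
      by_cases hv' : v' = ""
      · simp only [markAltLoop]
        rw [if_neg (by simp [hv'])]
        rw [ih hnd.2 hs.2, flook_eq_none_of_not_mem rest k hnd.1]
        simp [flook, hv']
      · simp only [markAltLoop]
        rw [if_pos (show (k = s ∨ True) ∧ v' ≠ "" from ⟨Or.inr trivial, hv'⟩)]
        by_cases hvv : v' = v
        · subst hvv
          rw [if_neg (by simp)]
          rw [markAltLoop_no_match _ _ _ _ hs.2 hnd.1]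
          simp [flook, hv']
        · rw [if_pos hvv]
          simp [flook, hv', hvv]
    · simp only [markAltLoop]
      by_cases hm : (k = s ∨ k = t) ∧ v' ≠ ""
      · exact absurd hm (by rintro ⟨(h | h), _⟩ <;> [exact hs.1 h.symm; exact hkt h])
      · simp only [if_neg hm]
        rw [ih hnd.2 hs.2]
        simp [flook, hkt]

-- symmetry of the loop in the two symbols
theorem markAltLoop_comm (s t : String) (l : List (String × String)) (label : Option String) :
    markAltLoop s t l label = markAltLoop t s l label := by
  induction l generalizing label with
  | nil => rfl
  | cons p rest ih =>
    obtain ⟨k, v⟩ := p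
    simp only [markAltLoop]
    by_cases h : (k = s ∨ k = t) ∧ v ≠ ""
    · rw [if_pos h, if_pos (show (k = t ∨ k = s) ∧ v ≠ "" from ⟨h.1.symm, h.2⟩)]
      cases label with
      | none => exact ih _
      | some l' => by_cases hv : v = l' <;> simp [hv, ih]
    · rw [if_neg h, if_neg (show ¬((k = t ∨ k = s) ∧ v ≠ "") from fun hh => h ⟨hh.1.symm, hh.2⟩)]
      exact ih _

theorem b_eq_combine2 (sources : List (String × String)) (s t : String)
    (hnd : (sources.map Prod.fst).Nodup) :
    mark_source_for_symbols_py_alt sources s t = combine2 (flook sources s) (flook sources t) := by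
  unfold mark_source_for_symbols_py_alt
  induction sources with
  | nil => rfl
  | cons p rest ih =>
    obtain ⟨k, v⟩ := p
    simp only [List.map_cons, List.nodup_cons] at hnd
    simp only [markAltLoop]
    by_cases hm : (k = s ∨ k = t) ∧ v ≠ ""
    · obtain ⟨hk, hv⟩ := hm
      simp only [if_pos (show (k = s ∨ k = t) ∧ v ≠ "" from ⟨hk, hv⟩)]
      rcases hk with hk | hk
      · subst hk
        rw [markAltLoop_some _ _ _ _ hnd.2 hnd.1]
        by_cases hkt : k = t
        · subst hkt
          rw [flook_eq_none_of_not_mem _ _ hnd.1]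
          simp [flook, hv, combine2]
        · simp [flook, hv, hkt]
          cases hw : flook rest t with
          | none => simp [combine2]
          | some w =>
            by_cases hwv : w = v
            · simp [combine2, hwv]
            · have hvw : ¬v = w := fun h => hwv h.symm
              simp [combine2, hwv, hvw]
      · subst hk
        rw [markAltLoop_comm, markAltLoop_some _ _ _ _ hnd.2 hnd.1]
        by_cases hks : k = s
        · subst hks
          rw [flook_eq_none_of_not_mem _ _ hnd.1]
          simp [flook, hv, combine2]
        · simp [flook, hv, hks]
          cases hw : flook rest s with
          | none => simp [combine2]
          | some w =>
            by_cases hwv : w = v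
            · simp [combine2, hwv]
            · have hvw : ¬v = w := fun h => hwv h.symm
              simp [combine2, hwv, hvw]
    · simp only [if_neg hm]
      rw [ih hnd.2]
      push_neg at hm
      by_cases hks : k = s <;> by_cases hkt : k = t
      · subst hks; subst hkt
        have hv : v = "" := hm (Or.inl rfl)
        rw [flook_eq_none_of_not_mem rest k hnd.1]
        simp [flook, hv]
      · subst hks
        have hv : v = "" := hm (Or.inl rfl)
        rw [flook_eq_none_of_not_mem rest k hnd.1]
        simp [flook, hv, hkt]
      · subst hkt
        have hv : v = "" := hm (Or.inr rfl)
        rw [flook_eq_none_of_not_mem rest k hnd.1]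
        simp [flook, hv, hks]
      · simp [flook, hks, hkt]

-- ===== VERDICT (by name: the statement is the Claim_ definition above) =====
theorem mark_source_for_symbols_py_spec : Claim_equal_mark_source_for_symbols_py := by
  intro sources s t _ hnd
  unfold Spec_mark_source_for_symbols_py
  rw [a_eq_combine2, b_eq_combine2 _ _ _ hnd]
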